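-- pv_equiv track=rewrite | github.com/BryantSteed/Project-Alignment | alignment.py | get_edit_sequence
-- ===== SOURCE A (Python) =====
-- def get_edit_sequence(seq1, seq2, prev):
--     rev_edits = []
--     i, j = len(seq1) - 1, len(seq2) - 1
--     while True:
--         if not prev.get((i, j)):
--             break
--         i_prev, j_prev = prev[(i, j)]
--         if i_prev == i - 1 and j_prev == j - 1:
--             rev_edits.append("sub")
--         elif i_prev == i and j_prev == j - 1:
--             rev_edits.append("ins")
--         else:
--             rev_edits.append("del")
--         i, j = i_prev, j_prev
--     edits = rev_edits[::-1]
--     return edits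
-- ===== SOURCE B (Python) =====
-- def get_edit_sequence(seq1, seq2, prev):
--     # Pass 1: follow the prev pointers, collecting the visited nodes.
--     node = (len(seq1) - 1, len(seq2) - 1)
--     path = [node]
--     while prev.get(node):
--         node = prev[node]
--         path.append(node)
--     # Pass 2: walk the path in forward order, classifying each transition
--     # by its coordinate delta; no trailing reversal of the edit list.
--     path.reverse()
--     edits = []
--     for (ip, jp), (i, j) in zip(path, path[1:]):
--         if i - ip == 1 and j - jp == 1:
--             edits.append("sub")
--         elif i - ip == 0 and j - jp == 1:
--             edits.append("ins")
--         else: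
--             edits.append("del")
--     return edits
-- ===== Notes on version B (the rewrite author's own statement) =====
-- stated objective: alternative
-- what changed: B splits A's single backtrack-and-label loop into two passes: it first collects the visited (i,j) nodes by following prev, reverses the path once, then labels each consecutive transition in forward order by its coordinate delta, so the edit list is built forward with no trailing reversal.
import Mathlib
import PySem

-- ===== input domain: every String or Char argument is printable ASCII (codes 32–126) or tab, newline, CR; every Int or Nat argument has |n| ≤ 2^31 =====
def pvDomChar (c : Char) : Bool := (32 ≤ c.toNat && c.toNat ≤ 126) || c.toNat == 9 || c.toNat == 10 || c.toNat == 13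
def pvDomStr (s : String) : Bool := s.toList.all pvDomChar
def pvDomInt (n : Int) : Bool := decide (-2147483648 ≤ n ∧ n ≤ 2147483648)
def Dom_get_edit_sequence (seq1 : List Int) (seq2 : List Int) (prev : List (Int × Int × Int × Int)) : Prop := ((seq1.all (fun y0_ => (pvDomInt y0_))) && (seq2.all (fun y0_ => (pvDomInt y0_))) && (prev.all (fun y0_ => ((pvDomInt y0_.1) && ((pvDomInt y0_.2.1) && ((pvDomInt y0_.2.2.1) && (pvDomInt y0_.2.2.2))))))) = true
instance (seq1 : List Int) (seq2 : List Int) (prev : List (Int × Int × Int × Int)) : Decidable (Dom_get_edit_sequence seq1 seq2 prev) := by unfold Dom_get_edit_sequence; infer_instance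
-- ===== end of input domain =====

-- B splits A's single backtrack-and-label loop into two passes: it first collects the
-- visited nodes, reverses the path once, then labels consecutive transitions forward
-- by coordinate deltas (objective: alternative decomposition, same cost).

-- ===== PORT A =====
-- prev.get((i, j)): the dict is an association list (lookup = first match); the stored
-- values are int pairs, which are always truthy, so `not prev.get((i,j))` = key missing.
def pvDget (prev : List (Int × Int × Int × Int)) (i j : Int) : Option (Int × Int) :=
  match prev.find? (fun e => e.1 == i && e.2.1 == j) with
  | some e => some (e.2.2.1, e.2.2.2)
  | none => none

def pvLabelA (i j ip jp : Int) : String :=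
  if ip = i - 1 ∧ jp = j - 1 then "sub"
  else if ip = i ∧ jp = j - 1 then "ins"
  else "del"

-- the `while True` loop; fuel prev.length + 1 is exact whenever the Python loop terminates
-- (the chain is deterministic, so a key visited twice would cycle forever: on a terminating
-- run the successfully looked-up keys are distinct keys of prev, at most prev.length of them)
def pvLoopA (prev : List (Int × Int × Int × Int)) : Nat → Int → Int → List String → List String
  | 0, _, _, rev_edits => rev_edits.reverse
  | fuel+1, i, j, rev_edits =>
    match pvDget prev i j with
    | none => rev_edits.reverse
    | some (ip, jp) => pvLoopA prev fuel ip jp (rev_edits ++ [pvLabelA i j ip jp])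

def get_edit_sequence (seq1 : List Int) (seq2 : List Int) (prev : List (Int × Int × Int × Int)) : List String :=
  pvLoopA prev (prev.length + 1) ((seq1.length : Int) - 1) ((seq2.length : Int) - 1) []

-- ===== PORT B =====
def pvLabelB (p q : Int × Int) : String :=
  if q.1 - p.1 = 1 ∧ q.2 - p.2 = 1 then "sub"
  else if q.1 - p.1 = 0 ∧ q.2 - p.2 = 1 then "ins"
  else "del"

-- pass 1 of Source B: collect the visited nodes (same fuel as A's loop)
def pvBuildPath (prev : List (Int × Int × Int × Int)) : Nat → (Int × Int) → List (Int × Int) → List (Int × Int)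
  | 0, _, path => path
  | fuel+1, node, path =>
    match pvDget prev node.1 node.2 with
    | none => path
    | some n => pvBuildPath prev fuel n (path ++ [n])

def pvClassify (path : List (Int × Int)) : List String :=
  (path.zip (path.drop 1)).map (fun pq => pvLabelB pq.1 pq.2)

def get_edit_sequence_alt (seq1 : List Int) (seq2 : List Int) (prev : List (Int × Int × Int × Int)) : List String :=
  -- start = (len(seq1)-1, len(seq2)-1); pass 2 zips path with path[1:] and classifies deltas
  pvClassify ((pvBuildPath prev (prev.length + 1)
      ((seq1.length : Int) - 1, (seq2.length : Int) - 1)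
      [((seq1.length : Int) - 1, (seq2.length : Int) - 1)]).reverse)

-- ===== PRECONDITION & SPEC =====
-- No Pre_: on every input on which the Python A returns, the backtrack chain visits
-- distinct keys of prev, so at most prev.length lookups succeed and the shared fuel
-- prev.length + 1 is exact there; on cyclic tables Python A (and Python B) never
-- returns, while both ports truncate identically, so the equality below still holds.
def Spec_get_edit_sequence (seq1 : List Int) (seq2 : List Int) (prev : List (Int × Int × Int × Int)) (out : List String) : Prop := out = get_edit_sequence_alt seq1 seq2 prev
instance (seq1 : List Int) (seq2 : List Int) (prev : List (Int × Int × Int × Int)) (out : List String) : Decidable (Spec_get_edit_sequence seq1 seq2 prev out) := by unfold Spec_get_edit_sequence; infer_instance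

-- ===== CLAIM (what is proved, stated in full; the proofs are below) =====
def Claim_equal_get_edit_sequence : Prop := ∀ (seq1 : List Int) (seq2 : List Int) (prev : List (Int × Int × Int × Int)), Dom_get_edit_sequence seq1 seq2 prev → Spec_get_edit_sequence seq1 seq2 prev (get_edit_sequence seq1 seq2 prev)

-- ===== LEMMAS AND PROOFS =====

-- the chain of labels in backtrack order, and the chain of visited nodes after `start`
def pvChainE (prev : List (Int × Int × Int × Int)) : Nat → (Int × Int) → List String
  | 0, _ => []
  | fuel+1, node =>
    match pvDget prev node.1 node.2 with
    | none => []
    | some n => pvLabelA node.1 node.2 n.1 n.2 :: pvChainE prev fuel n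

def pvChainP (prev : List (Int × Int × Int × Int)) : Nat → (Int × Int) → List (Int × Int)
  | 0, _ => []
  | fuel+1, node =>
    match pvDget prev node.1 node.2 with
    | none => []
    | some n => n :: pvChainP prev fuel n

theorem pvLoopA_eq (prev : List (Int × Int × Int × Int)) :
    ∀ (fuel : Nat) (i j : Int) (rev : List String),
      pvLoopA prev fuel i j rev = (rev ++ pvChainE prev fuel (i, j)).reverse := by
  intro fuel
  induction fuel with
  | zero => intro i j rev; simp [pvLoopA, pvChainE]
  | succ n ih =>
    intro i j rev
    simp only [pvLoopA, pvChainE]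
    cases h : pvDget prev i j with
    | none => simp
    | some p => cases p with | mk ip jp => simp [ih, List.append_assoc]

theorem pvBuildPath_eq (prev : List (Int × Int × Int × Int)) :
    ∀ (fuel : Nat) (node : Int × Int) (path : List (Int × Int)),
      pvBuildPath prev fuel node path = path ++ pvChainP prev fuel node := by
  intro fuel
  induction fuel with
  | zero => intro node path; simp [pvBuildPath, pvChainP]
  | succ n ih =>
    intro node path
    simp only [pvBuildPath, pvChainP]
    cases h : pvDget prev node.1 node.2 with
    | none => simp
    | some p => simp [ih, List.append_assoc]

theorem pvLabel_swap (i j ip jp : Int) :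
    pvLabelB (ip, jp) (i, j) = pvLabelA i j ip jp := by
  simp only [pvLabelA, pvLabelB]
  split_ifs <;> first | rfl | omega

-- consecutive pairs of a list
theorem pvPairs_snoc {α : Type} (l : List α) (a : α) :
    (l ++ [a]).zip ((l ++ [a]).drop 1)
      = l.zip (l.drop 1) ++ (l.getLast?.map (fun b => (b, a))).toList := by
  induction l with
  | nil => simp
  | cons x xs ih =>
    cases xs with
    | nil => simp
    | cons y ys => simpa using ih

theorem pvPairs_reverse {α : Type} (l : List α) :
    l.reverse.zip (l.reverse.drop 1)
      = ((l.zip (l.drop 1)).map Prod.swap).reverse := by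
  induction l with
  | nil => simp
  | cons x xs ih =>
    cases xs with
    | nil => simp
    | cons y ys =>
      have h := pvPairs_snoc ((y :: ys).reverse) x
      simp only [List.reverse_cons] at *
      rw [h, ih]
      simp [List.getLast?_reverse]

theorem pvChain_classify (prev : List (Int × Int × Int × Int)) :
    ∀ (fuel : Nat) (node : Int × Int),
      ((node :: pvChainP prev fuel node).zip ((node :: pvChainP prev fuel node).drop 1)).map
          (fun pq => pvLabelB pq.2 pq.1)
        = pvChainE prev fuel node := by
  intro fuel
  induction fuel with
  | zero => intro node; simp [pvChainP, pvChainE]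
  | succ n ih =>
    intro node
    simp only [pvChainP, pvChainE]
    cases h : pvDget prev node.1 node.2 with
    | none => simp
    | some p =>
      have := ih p
      simp only [List.drop_one, List.zip_cons_cons, List.tail_cons, List.map_cons] at *
      rw [this]
      cases p with | mk a b => cases node with | mk c d => simp [pvLabel_swap]

-- ===== VERDICT (by name: the statement is the Claim_ definition above) =====
theorem get_edit_sequence_spec : Claim_equal_get_edit_sequence := by
  intro seq1 seq2 prev _
  unfold Spec_get_edit_sequence get_edit_sequence get_edit_sequence_alt pvClassify
  rw [pvLoopA_eq, pvBuildPath_eq]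
  simp only [List.nil_append, List.singleton_append]
  rw [pvPairs_reverse, List.map_reverse, List.map_map]
  rw [show ((fun pq : (Int × Int) × (Int × Int) => pvLabelB pq.1 pq.2) ∘ Prod.swap)
        = (fun pq => pvLabelB pq.2 pq.1) from rfl]
  rw [pvChain_classify]
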